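-- pv_equiv track=rewrite | github.com/youth4ever/orion | Project EULER/pb159 Digital root sums of factorisations.py | pair_Factors
-- ===== SOURCE A (Python) =====
-- def pair_Factors(n):
--     m=n
--     todo, combis = [(n, 2, [])], []
--     while todo:
--         n, i, combi = todo.pop()
--         while i * i <= n:
--             if n % i == 0:
--                 combis += combi + [i, n//i],
--                 todo += (n//i, i, combi+[i]),
--             i += 1
--     return combis+[[m]]
-- ===== SOURCE B (Python) =====
-- def pair_Factors(n):
--     def factor(n, i, prefix):
--         res, conts = [], []
--         while i * i <= n:
--             if n % i == 0:
--                 res.append(prefix + [i, n // i])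
--                 conts.append((n // i, i, prefix + [i]))
--             i += 1
--         for m2, j, p in reversed(conts):
--             res += factor(m2, j, p)
--         return res
--     return factor(n, 2, []) + [[n]]
-- ===== Notes on version B (the rewrite author's own statement) =====
-- stated objective: alternative
-- what changed: A's explicit LIFO work-stack loop is recast as a recursive function factor(n, i, prefix) that collects the divisor pairs of one level and then recurses into the continuations in reversed order, reproducing the stack's DFS emission order.
import Mathlib
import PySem

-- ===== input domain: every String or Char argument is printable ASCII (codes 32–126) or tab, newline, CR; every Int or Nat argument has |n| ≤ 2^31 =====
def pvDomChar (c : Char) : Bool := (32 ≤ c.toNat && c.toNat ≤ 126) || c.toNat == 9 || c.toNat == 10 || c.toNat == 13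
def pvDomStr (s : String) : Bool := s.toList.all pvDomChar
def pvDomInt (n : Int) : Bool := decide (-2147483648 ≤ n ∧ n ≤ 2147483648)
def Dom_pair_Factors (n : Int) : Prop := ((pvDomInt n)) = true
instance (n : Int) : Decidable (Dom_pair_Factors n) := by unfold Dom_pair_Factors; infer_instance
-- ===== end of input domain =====

-- B recasts A's explicit LIFO-stack loop as a recursive function over the same
-- trial-division recurrence (same values in the same order); objective: alternative decomposition.

-- ===== PORT A =====
-- small arithmetic facts used by the termination proofs of both ports
lemma le_mul_self_int (i : Int) : i ≤ i * i := by
  rcases Int.lt_or_le i 1 with h | h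
  · exact le_trans (by omega) (mul_self_nonneg i)
  · exact (le_mul_iff_one_le_left (by omega)).mpr h

lemma pvDec {n i : Int} (h : i * i ≤ n) : (n + 1 - (i + 1)).toNat < (n + 1 - i).toNat := by
  have h1 : i ≤ n := le_trans (le_mul_self_int i) h
  exact (Int.toNat_lt_toNat (sub_pos.mpr (Int.lt_add_one_iff.mpr h1))).mpr
    (sub_lt_sub_left (lt_add_one i) (n + 1))

lemma four_le_of_sq {n j : Int} (h2 : 2 ≤ j) (hjj : j * j ≤ n) : 4 ≤ n := by
  have h4 : (2:Int) * 2 ≤ j * j := mul_le_mul h2 h2 (by omega) (by omega)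
  omega

-- A's inner `while i * i <= n` loop: returns (combis appended, todo items pushed), in order.
def innerA (n i : Int) (combi : List Int) : List (List Int) × List (Int × Int × List Int) :=
  if _h : i * i ≤ n then
    let rest := innerA n (i + 1) combi
    if PySem.Int.mod n i = 0 then
      ((combi ++ [i, PySem.Int.floordiv n i]) :: rest.1,
       (PySem.Int.floordiv n i, i, combi ++ [i]) :: rest.2)
    else rest
  else ([], [])
termination_by (n + 1 - i).toNat
decreasing_by
  exact pvDec _h

-- every item A's inner loop pushes records a divisor ≥ i together with the cofactor
-- (needed by loopA below, for its invariant and its termination)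
lemma innerA_mem {n i : Int} {combi : List Int} :
    ∀ s ∈ (innerA n i combi).2,
    i ≤ s.2.1 ∧ s.2.1 * s.2.1 ≤ n ∧ s.1 = PySem.Int.floordiv n s.2.1 := by
  fun_induction innerA n i combi with
  | case1 i h rest hdvd ih =>
      intro s hs
      rcases List.mem_cons.mp hs with rfl | hmem
      · exact ⟨le_refl _, h, rfl⟩
      · have := ih s hmem; exact ⟨by omega, this.2⟩
  | case2 i h rest hdvd ih =>
      intro s hs
      have := ih s hs; exact ⟨by omega, this.2⟩
  | case3 i h => intro s hs; simp at hs

-- termination measure for A's stack loop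
def pvWeight (todo : List (Int × Int × List Int)) : Nat :=
  (todo.map (fun s => 2 ^ s.1.toNat)).sum

lemma innerA_weight {n : Int} {combi : List Int} (hn : 0 ≤ n) :
    ∀ {i : Int}, 2 ≤ i →
      pvWeight (innerA n i combi).2 ≤ (n.toNat / 2 + 1 - i.toNat) * 2 ^ (n.toNat / 2) := by
  intro i hi2
  fun_induction innerA n i combi with
  | case1 i h rest hdvd ih =>
      have hi0 : (0:Int) ≤ i := le_trans (by decide) hi2
      have hIi : i = ((i.toNat : Nat) : Int) := (Int.toNat_of_nonneg hi0).symm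
      have hNn : n = ((n.toNat : Nat) : Int) := (Int.toNat_of_nonneg hn).symm
      have hII : i.toNat * i.toNat ≤ n.toNat := by
        rw [hNn, hIi] at h; exact_mod_cast h
      have h2I : 2 ≤ i.toNat := (Int.le_toNat hi0).mpr (by exact_mod_cast hi2)
      have hfd_i : PySem.Int.floordiv n i = ((n.toNat / i.toNat : Nat) : Int) := by
        rw [hNn, hIi]; exact PySem.Int.floordiv_natCast _ _
      have hdivle : n.toNat / i.toNat ≤ n.toNat / 2 := Nat.div_le_div_left h2I (by decide)
      have hIle : i.toNat ≤ n.toNat / 2 :=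
        (Nat.le_div_iff_mul_le (by decide)).mpr (le_trans (Nat.mul_le_mul_left i.toNat h2I) hII)
      have hpow : 2 ^ (n.toNat / i.toNat) ≤ 2 ^ (n.toNat / 2) :=
        Nat.pow_le_pow_right Nat.zero_lt_two hdivle
      have hih0 := ih (le_trans hi2 (lt_add_one i).le)
      have hsucc : (i + 1).toNat = i.toNat + 1 := Int.toNat_add hi0 (by decide)
      rw [hsucc] at hih0
      simp only [pvWeight, List.map_cons, List.sum_cons] at hih0 ⊢
      have hih1 : (List.map (fun s => 2 ^ s.1.toNat) rest.2).sum
          ≤ (n.toNat / 2 + 1 - (i.toNat + 1)) * 2 ^ (n.toNat / 2) := hih0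
      clear hih0
      rw [hfd_i]
      simp only [Int.toNat_natCast]
      have hcnt : n.toNat / 2 + 1 - i.toNat = (n.toNat / 2 + 1 - (i.toNat + 1)) + 1 := by
        rw [Nat.succ_sub_succ, Nat.succ_sub hIle]
      rw [hcnt, Nat.succ_mul]
      exact le_trans (Nat.add_le_add hpow hih1) (le_of_eq (Nat.add_comm _ _))
  | case2 i h rest hdvd ih =>
      have hi0 : (0:Int) ≤ i := le_trans (by decide) hi2
      have hih0 := ih (le_trans hi2 (lt_add_one i).le)
      have hsucc : (i + 1).toNat = i.toNat + 1 := Int.toNat_add hi0 (by decide)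
      rw [hsucc] at hih0
      exact le_trans hih0
        (Nat.mul_le_mul_right _ (Nat.sub_le_sub_left (Nat.le_succ _) _))
  | case3 i h => simp [pvWeight]

-- the items pushed by one popped stack entry weigh strictly less than the entry itself
lemma innerA_weight_lt {n i : Int} {combi : List Int} (hi : 2 ≤ i) :
    pvWeight (innerA n i combi).2 < 2 ^ n.toNat := by
  rcases hts : (innerA n i combi).2 with _ | ⟨s, ts⟩
  · simp [pvWeight]
  · have hsmem : s ∈ (innerA n i combi).2 := by rw [hts]; exact List.mem_cons_self ..
    obtain ⟨hij, hjj, -⟩ := innerA_mem s hsmem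
    have hn4 : 4 ≤ n := four_le_of_sq (le_trans hi hij) hjj
    have hi0 : (0:Int) ≤ i := le_trans (by decide) hi
    have hn0 : (0:Int) ≤ n := le_trans (by decide) hn4
    have hw := innerA_weight (n := n) (combi := combi) hn0 hi
    have hI2 : 2 ≤ i.toNat := (Int.le_toNat hi0).mpr (by exact_mod_cast hi)
    have hN4 : 4 ≤ n.toNat := (Int.le_toNat hn0).mpr (by exact_mod_cast hn4)
    have hcount : n.toNat / 2 + 1 - i.toNat ≤ n.toNat / 2 - 1 :=
      le_trans (Nat.sub_le_sub_left hI2 _) (le_of_eq (Nat.succ_sub_succ _ 1))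
    have h1 : pvWeight (innerA n i combi).2 ≤ (n.toNat / 2 - 1) * 2 ^ (n.toNat / 2) :=
      le_trans hw (Nat.mul_le_mul_right _ hcount)
    have h2 : n.toNat / 2 - 1 < 2 ^ (n.toNat / 2) :=
      lt_of_le_of_lt (Nat.sub_le _ _) (Nat.lt_two_pow_self)
    have h3 : (n.toNat / 2 - 1) * 2 ^ (n.toNat / 2) < 2 ^ (n.toNat / 2) * 2 ^ (n.toNat / 2) :=
      Nat.mul_lt_mul_of_lt_of_le h2 (le_refl _) (Nat.two_pow_pos _)
    have h4 : 2 ^ (n.toNat / 2) * 2 ^ (n.toNat / 2) ≤ 2 ^ n.toNat := by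
      rw [← pow_add]
      exact Nat.pow_le_pow_right Nat.zero_lt_two
        (by rw [← Nat.mul_two]; exact Nat.div_mul_le_self _ _)
    rw [hts] at h1
    exact lt_of_le_of_lt h1 (lt_of_lt_of_le h3 h4)

-- the items pushed by one popped entry weigh less than the entry: the stack measure decreases
lemma pvLoopDec {n i : Int} {c : List Int} {rest : List (Int × Int × List Int)} (h2 : 2 ≤ i) :
    pvWeight ((innerA n i c).2.reverse ++ rest) < pvWeight ((n, i, c) :: rest) := by
  have hlt := innerA_weight_lt (n := n) (combi := c) h2
  simp only [pvWeight, List.map_append, List.map_reverse, List.sum_append, List.sum_reverse,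
    List.map_cons, List.sum_cons] at hlt ⊢
  omega

-- the stacked-divisor invariant is preserved by one step of the loop
lemma pvInvStep {n i : Int} {c : List Int} {rest : List (Int × Int × List Int)}
    (hinv : ∀ s ∈ (n, i, c) :: rest, 2 ≤ s.2.1) :
    ∀ s ∈ (innerA n i c).2.reverse ++ rest, 2 ≤ s.2.1 := by
  intro s hs
  rcases List.mem_append.mp hs with h1 | h2
  · exact le_trans (hinv (n, i, c) (List.mem_cons_self ..))
      (innerA_mem s (List.mem_reverse.mp h1)).1
  · exact hinv s (List.mem_cons_of_mem _ h2)

-- A's `while todo` loop; the stack is kept head-on-top (Python pops/pushes at the list's end,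
-- so the pushed block is reversed when moved to the head); hinv records Python's invariant
-- that every stacked trial divisor is ≥ 2 (used only for termination).
def loopA (todo : List (Int × Int × List Int)) (combis : List (List Int))
    (hinv : ∀ s ∈ todo, 2 ≤ s.2.1) : List (List Int) :=
  match todo with
  | [] => combis
  | (n, i, combi) :: rest =>
      loopA ((innerA n i combi).2.reverse ++ rest) (combis ++ (innerA n i combi).1)
        (pvInvStep hinv)
termination_by pvWeight todo
decreasing_by
  exact pvLoopDec (hinv (n, i, combi) (List.mem_cons_self ..))

def pair_Factors (n : Int) : List (List Int) :=
  loopA [(n, 2, [])] []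
    (fun s hs => by rw [List.mem_singleton] at hs; subst hs; exact le_refl 2) ++ [[n]]

-- ===== PORT B =====
-- B's `while` loop inside `factor`, accumulating res/conts as the Python appends to them.
def collectB (n i : Int) (pre : List Int) (res : List (List Int))
    (conts : List (Int × Int × List Int)) : List (List Int) × List (Int × Int × List Int) :=
  if _h : i * i ≤ n then
    if PySem.Int.mod n i = 0 then
      collectB n (i + 1) pre (res ++ [pre ++ [i, PySem.Int.floordiv n i]])
        (conts ++ [(PySem.Int.floordiv n i, i, pre ++ [i])])
    else collectB n (i + 1) pre res conts
  else (res, conts)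
termination_by (n + 1 - i).toNat
decreasing_by
  all_goals exact pvDec _h

-- every continuation B collects records a divisor ≥ i with its cofactor (for factorB's termination)
lemma collectB_mem {n : Int} {pre : List Int} : ∀ {i : Int} {res conts},
    ∀ s ∈ (collectB n i pre res conts).2,
    s ∈ conts ∨ (i ≤ s.2.1 ∧ s.2.1 * s.2.1 ≤ n ∧ s.1 = PySem.Int.floordiv n s.2.1) := by
  intro i res conts
  fun_induction collectB n i pre res conts with
  | case1 i res conts h hdvd ih =>
      intro s hs
      rcases ih s hs with hc | hnew
      · rcases List.mem_append.mp hc with hold | hpush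
        · exact Or.inl hold
        · rcases List.mem_singleton.mp hpush with rfl
          exact Or.inr ⟨le_refl _, h, rfl⟩
      · exact Or.inr ⟨by omega, hnew.2⟩
  | case2 i res conts h hdvd ih =>
      intro s hs
      rcases ih s hs with hc | hnew
      · exact Or.inl hc
      · exact Or.inr ⟨by omega, hnew.2⟩
  | case3 i res conts h => intro s hs; exact Or.inl hs

lemma collectB_snd_mem {n i : Int} {pre : List Int} {s : Int × Int × List Int}
    (hi : 2 ≤ i) (hs : s ∈ (collectB n i pre [] []).2) :
    2 ≤ s.2.1 ∧ s.1.toNat < n.toNat := by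
  rcases collectB_mem s hs with hc | ⟨hij, hjj, hfd⟩
  · simp at hc
  · have h2j : 2 ≤ s.2.1 := le_trans hi hij
    have hn : 4 ≤ n := four_le_of_sq h2j hjj
    have hlt : PySem.Int.floordiv n s.2.1 < n := by
      rw [PySem.Int.floordiv_eq_ediv_of_pos (by omega)]
      apply Int.ediv_lt_of_lt_mul (by omega)
      have hmul : n * 2 ≤ n * s.2.1 := mul_le_mul_of_nonneg_left h2j (by omega : (0:Int) ≤ n)
      omega
    have hge : 0 ≤ PySem.Int.floordiv n s.2.1 := by
      rw [PySem.Int.floordiv_eq_ediv_of_pos (by omega)]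
      exact Int.ediv_nonneg (by omega) (by omega)
    refine ⟨h2j, ?_⟩
    rw [hfd]
    omega

-- B's recursive `factor`: the collected res, then the continuations explored in reversed order;
-- hi records that trial division starts at a divisor ≥ 2 (used only for termination).
def factorB (n i : Int) (pre : List Int) (hi : 2 ≤ i) : List (List Int) :=
  (collectB n i pre [] []).1 ++
    ((collectB n i pre [] []).2.reverse.attach.flatMap
      (fun s => factorB s.1.1 s.1.2.1 s.1.2.2
        (collectB_snd_mem hi (List.mem_reverse.mp s.2)).1))
termination_by n.toNat
decreasing_by
  exact (collectB_snd_mem hi (List.mem_reverse.mp s.2)).2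

def pair_Factors_alt (n : Int) : List (List Int) :=
  factorB n 2 [] (le_refl 2) ++ [[n]]

-- ===== PRECONDITION & SPEC =====
def Spec_pair_Factors (n : Int) (out : List (List Int)) : Prop := out = pair_Factors_alt n
instance (n : Int) (out : List (List Int)) : Decidable (Spec_pair_Factors n out) := by unfold Spec_pair_Factors; infer_instance

-- ===== CLAIM (what is proved, stated in full; the proofs are below) =====
def Claim_equal_pair_Factors : Prop := ∀ (n : Int), Dom_pair_Factors n → Spec_pair_Factors n (pair_Factors n)

-- ===== LEMMAS AND PROOFS =====

-- total wrapper of factorB, for stating the loop/recursion correspondence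
def FB (s : Int × Int × List Int) : List (List Int) :=
  if h : 2 ≤ s.2.1 then factorB s.1 s.2.1 s.2.2 h else []

-- unfolding equations for A's inner loop
lemma innerA_pos {n i : Int} {c : List Int} (h : i * i ≤ n) (hdvd : PySem.Int.mod n i = 0) :
    innerA n i c = ((c ++ [i, PySem.Int.floordiv n i]) :: (innerA n (i + 1) c).1,
      (PySem.Int.floordiv n i, i, c ++ [i]) :: (innerA n (i + 1) c).2) := by
  rw [innerA.eq_def]
  simp [dif_pos h, if_pos hdvd]

lemma innerA_nodvd {n i : Int} {c : List Int} (h : i * i ≤ n) (hdvd : ¬ PySem.Int.mod n i = 0) :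
    innerA n i c = innerA n (i + 1) c := by
  rw [innerA.eq_def]
  simp [dif_pos h, if_neg hdvd]

lemma innerA_stop {n i : Int} {c : List Int} (h : ¬ i * i ≤ n) :
    innerA n i c = ([], []) := by
  rw [innerA.eq_def]
  simp [dif_neg h]

-- B's accumulating loop computes exactly A's inner-loop lists, appended to the accumulators
lemma collectB_eq {n : Int} {pre : List Int} : ∀ {i : Int} {res conts},
    collectB n i pre res conts = (res ++ (innerA n i pre).1, conts ++ (innerA n i pre).2) := by
  intro i res conts
  fun_induction collectB n i pre res conts with
  | case1 i res conts h hdvd ih =>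
      rw [ih, innerA_pos h hdvd]
      simp
  | case2 i res conts h hdvd ih =>
      rw [ih, innerA_nodvd h hdvd]
  | case3 i res conts h =>
      rw [innerA_stop h]
      simp

-- one call of B's factor = A's inner-loop output followed by the reversed continuations via FB
lemma factorB_eq {n i : Int} {pre : List Int} (hi : 2 ≤ i) :
    factorB n i pre hi = (innerA n i pre).1 ++ ((innerA n i pre).2.reverse.flatMap FB) := by
  rw [factorB]
  congr 1
  · rw [collectB_eq]; simp
  · have hfun : (fun s : {x // x ∈ (collectB n i pre [] []).2.reverse} =>
        factorB s.1.1 s.1.2.1 s.1.2.2 (collectB_snd_mem hi (List.mem_reverse.mp s.2)).1)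
        = fun s => FB s.1 := by
      funext s
      simp only [FB]
      rw [dif_pos (collectB_snd_mem hi (List.mem_reverse.mp s.2)).1]
    rw [hfun]
    simp only [List.flatMap_subtype, List.unattach_attach]
    rw [collectB_eq]
    simp

-- A's stack loop emits, after the pending combis, each stacked state's factorB output in order
lemma loopA_eq : ∀ (todo : List (Int × Int × List Int)) (combis : List (List Int))
    (hinv : ∀ s ∈ todo, 2 ≤ s.2.1),
    loopA todo combis hinv = combis ++ todo.flatMap FB := by
  intro todo combis hinv
  fun_induction loopA todo combis hinv with
  | case1 combis hinv1 hinv2 => simp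
  | case2 combis n i combi rest hinv1 hinv2 ih =>
      rw [ih]
      have h2 : 2 ≤ i := hinv1 (n, i, combi) (List.mem_cons_self ..)
      have hFB : FB (n, i, combi) = factorB n i combi h2 := by
        simp only [FB]; rw [dif_pos h2]
      rw [List.flatMap_cons, hFB, factorB_eq h2]
      simp [List.flatMap_append]

-- ===== VERDICT (by name: the statement is the Claim_ definition above) =====
theorem pair_Factors_spec : Claim_equal_pair_Factors := by
  intro n _
  unfold Spec_pair_Factors pair_Factors pair_Factors_alt
  rw [loopA_eq]
  simp [FB]
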